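-- pv_equiv track=rewrite | github.com/ksui01/MacCheeseGUI | gui_try3.py | plotSignal
-- ===== SOURCE A (Python) =====
-- def plotSignal(sigVal):
--     newSigVal = []
--     prevSigVal = sigVal[0]
--     for i in range(len(sigVal)):
--         currSigVal = sigVal[i]
--         if (i == 0):
--             newSigVal.append(sigVal[i])
--         elif (prevSigVal == currSigVal):
--             newSigVal.append(sigVal[i])
--         else:
--             newSigVal.append(sigVal[i - 1])
--             newSigVal.append(sigVal[i])
--         if (i == len(sigVal) - 1):
--             newSigVal.append(sigVal[i])
--         prevSigVal = sigVal[i]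
--     return newSigVal
-- ===== SOURCE B (Python) =====
-- def plotSignal(sigVal):
--     # Stage 1: run-length encode the signal into (value, count) runs.
--     runs = []
--     cur = sigVal[0]
--     cnt = 0
--     for v in sigVal:
--         if v == cur:
--             cnt += 1
--         else:
--             runs.append((cur, cnt))
--             cur, cnt = v, 1
--     runs.append((cur, cnt))
--     # Stage 2: a run of k equal values appears k+1 times in the step plot
--     # (one extra copy at the run boundary / endpoint).
--     out = []
--     for v, k in runs:
--         out += [v] * (k + 1)
--     return out
-- ===== Notes on version B (the rewrite author's own statement) =====
-- stated objective: alternative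
-- what changed: Replaces A's single-pass index loop with boundary flags by a two-stage algorithm: run-length encode the signal into (value, count) runs, then expand each run of k equal values into k+1 copies.
import Mathlib
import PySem

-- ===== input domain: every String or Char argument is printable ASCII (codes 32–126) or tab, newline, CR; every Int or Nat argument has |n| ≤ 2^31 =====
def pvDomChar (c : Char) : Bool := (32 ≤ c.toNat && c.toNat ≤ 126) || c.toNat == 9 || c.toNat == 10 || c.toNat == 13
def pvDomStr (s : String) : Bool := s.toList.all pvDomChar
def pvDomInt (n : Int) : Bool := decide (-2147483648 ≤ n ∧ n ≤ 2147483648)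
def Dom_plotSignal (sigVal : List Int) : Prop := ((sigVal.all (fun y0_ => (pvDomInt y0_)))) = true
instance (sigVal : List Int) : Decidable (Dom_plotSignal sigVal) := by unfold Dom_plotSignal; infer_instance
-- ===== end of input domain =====

-- B replaces A's single-pass index loop with boundary flags by two staged passes:
-- run-length encoding into (value, count) runs, then expanding each run of k equal
-- values into k+1 copies ('alternative').

-- ===== PORT A =====
-- loop body of A's 'for i in range(len(sigVal))'; state = (newSigVal, prevSigVal)
def plotStep (sigVal : List Int) (st : List Int × Int) (i : Int) : List Int × Int :=
  let currSigVal := PySem.List.pyGetD sigVal i 0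
  let newSigVal :=
    if i = 0 then st.1 ++ [currSigVal]
    else if st.2 = currSigVal then st.1 ++ [currSigVal]
    else st.1 ++ [PySem.List.pyGetD sigVal (i - 1) 0, currSigVal]
  let newSigVal := if i = (sigVal.length : Int) - 1 then newSigVal ++ [currSigVal] else newSigVal
  (newSigVal, currSigVal)

def plotSignal (sigVal : List Int) : List Int :=
  match sigVal with
  | [] => []   -- 'sigVal[0]' raises IndexError on the empty list; Pre_ excludes it
  | h :: _ =>
    ((PySem.List.pyRange 0 (sigVal.length : Int)).foldl (plotStep sigVal) ([], h)).1

-- ===== PORT B =====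
-- loop body of B's stage 1 'for v in sigVal'; state = (runs, cur, cnt)
def runStep (st : List (Int × Int) × Int × Int) (v : Int) : List (Int × Int) × Int × Int :=
  if v = st.2.1 then (st.1, st.2.1, st.2.2 + 1)
  else (st.1 ++ [(st.2.1, st.2.2)], v, 1)

-- loop body of B's stage 2 'for v, k in runs': out += [v] * (k + 1)
def expandRun (out : List Int) (r : Int × Int) : List Int :=
  out ++ List.replicate (r.2 + 1).toNat r.1

def plotSignal_alt (sigVal : List Int) : List Int :=
  match sigVal with
  | [] => []   -- 'sigVal[0]' raises IndexError on the empty list; Pre_ excludes it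
  | h :: _ =>
    let st := sigVal.foldl runStep ([], h, 0)
    (st.1 ++ [(st.2.1, st.2.2)]).foldl expandRun []

-- ===== PRECONDITION & SPEC =====
-- Pre_ excludes exactly the empty list, on which A (and B) raises IndexError at 'sigVal[0]'.
def Pre_plotSignal (sigVal : List Int) : Prop := sigVal ≠ []
instance (sigVal : List Int) : Decidable (Pre_plotSignal sigVal) := by unfold Pre_plotSignal; infer_instance

def pvWitness_plotSignal : List Int := [1, 1, 2]

def Spec_plotSignal (sigVal : List Int) (out : List Int) : Prop := out = plotSignal_alt sigVal
instance (sigVal : List Int) (out : List Int) : Decidable (Spec_plotSignal sigVal out) := by unfold Spec_plotSignal; infer_instance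

-- ===== CLAIM (what is proved, stated in full; the proofs are below) =====
def Claim_equal_plotSignal : Prop := ∀ (sigVal : List Int), Dom_plotSignal sigVal → Pre_plotSignal sigVal → Spec_plotSignal sigVal (plotSignal sigVal)

-- ===== LEMMAS AND PROOFS =====

-- common recursive shape of the step-plot output
def pvStep : List Int → List Int
  | [] => []
  | [a] => [a, a]
  | a :: b :: t => (if a = b then [a] else [a, a]) ++ pvStep (b :: t)

-- output A's residual loop produces from a current value and the remaining elements
def pvCore : Int → List Int → List Int
  | _, [] => []
  | p, c :: t => (if p = c then [c] else [p, c]) ++ pvCore c t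

-- output B's stage 1+2 will still contribute given current run (cur, cnt) and remaining input
def pvG : Int → Int → List Int → List Int
  | cur, cnt, [] => List.replicate (cnt + 1).toNat cur
  | cur, cnt, v :: l =>
    if v = cur then pvG cur (cnt + 1) l
    else List.replicate (cnt + 1).toNat cur ++ pvG v 1 l

theorem pvExpandFold (rs : List (Int × Int)) : ∀ acc : List Int,
    rs.foldl expandRun acc = acc ++ rs.foldl expandRun [] := by
  induction rs with
  | nil => simp
  | cons r rs ih =>
    intro acc
    rw [List.foldl_cons, List.foldl_cons, ih, ih (expandRun [] r)]
    simp [expandRun, List.append_assoc]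

theorem pvRunFold (l : List Int) : ∀ (runs : List (Int × Int)) (cur cnt : Int),
    (((l.foldl runStep (runs, cur, cnt)).1 ++
        [((l.foldl runStep (runs, cur, cnt)).2.1, (l.foldl runStep (runs, cur, cnt)).2.2)]).foldl expandRun [])
      = runs.foldl expandRun [] ++ pvG cur cnt l := by
  induction l with
  | nil => intro runs cur cnt; rw [pvExpandFold]; simp [pvG, expandRun]
  | cons v l ih =>
    intro runs cur cnt
    by_cases h : v = cur
    · subst h
      simp [List.foldl_cons, runStep, pvG, ih]
    · simp only [List.foldl_cons, runStep, pvG, if_neg h, ih]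
      rw [pvExpandFold (runs ++ [(cur, cnt)])]
      rw [List.foldl_append, pvExpandFold [(cur, cnt)] (runs.foldl expandRun [])]
      simp [expandRun, List.append_assoc]

theorem pvG_step (l : List Int) : ∀ (cur cnt : Int), 1 ≤ cnt →
    pvG cur cnt l = List.replicate (cnt - 1).toNat cur ++ pvStep (cur :: l) := by
  induction l with
  | nil =>
    intro cur cnt h
    have : (cnt + 1).toNat = (cnt - 1).toNat + 2 := by omega
    simp [pvG, pvStep, this, List.replicate_succ']
  | cons v l ih =>
    intro cur cnt h
    by_cases hv : v = cur
    · rw [pvG, if_pos hv, ih cur (cnt + 1) (by omega), hv]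
      have : (cnt + 1 - 1).toNat = (cnt - 1).toNat + 1 := by omega
      rw [this, pvStep, if_pos rfl, List.replicate_succ']
      simp
    · rw [pvG, if_neg hv, ih v 1 le_rfl]
      have : (cnt + 1).toNat = (cnt - 1).toNat + 2 := by omega
      rw [this, pvStep, if_neg (fun e => hv e.symm)]
      simp [List.replicate_succ', List.append_assoc]

theorem pvAltEq (h : Int) (t : List Int) :
    plotSignal_alt (h :: t) = pvStep (h :: t) := by
  show (((h :: t).foldl runStep ([], h, 0)).1 ++ _).foldl expandRun [] = _
  rw [pvRunFold (h :: t) [] h 0]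
  simp only [List.foldl_nil, List.nil_append]
  rw [show pvG h 0 (h :: t) = pvG h 1 t from by simp [pvG]]
  rw [pvG_step t h 1 le_rfl]
  simp

-- ===== A-side characterisation (fold invariant over indices) =====

theorem pvGetD_drop {sig : List Int} {k : Nat} (h : k < sig.length) :
    sig.drop k = sig.getD k 0 :: sig.drop (k + 1) := by
  rw [List.drop_eq_getElem_cons h, List.getD_eq_getElem sig 0 h]

theorem pvAFold (sig : List Int) : ∀ (d k : Nat) (acc : List Int),
    k < sig.length → sig.length = k + 1 + d →
    ((PySem.List.pyRange ((k : Int) + 1) (sig.length : Int)).foldl (plotStep sig) (acc, sig.getD k 0)).1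
      = if k + 1 = sig.length then acc
        else acc ++ pvCore (sig.getD k 0) (sig.drop (k + 1)) ++ [sig.getD (sig.length - 1) 0] := by
  intro d
  induction d with
  | zero =>
    intro k acc hk hlen
    have h1 : ((k : Int) + 1) = (sig.length : Int) := by omega
    rw [h1]
    simp [PySem.List.pyRange, if_pos (by omega : k + 1 = sig.length)]
  | succ d ih =>
    intro k acc hk hlen
    have hlt : ((k : Int) + 1) < (sig.length : Int) := by omega
    rw [PySem.List.pyRange_one_cons hlt, List.foldl_cons]
    have hk1 : k + 1 < sig.length := by omega
    have hstep : plotStep sig (acc, sig.getD k 0) ((k : Int) + 1) =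
        ((if k + 2 = sig.length
            then acc ++ (if sig.getD k 0 = sig.getD (k+1) 0 then [sig.getD (k+1) 0] else [sig.getD k 0, sig.getD (k+1) 0]) ++ [sig.getD (k+1) 0]
            else acc ++ (if sig.getD k 0 = sig.getD (k+1) 0 then [sig.getD (k+1) 0] else [sig.getD k 0, sig.getD (k+1) 0])),
         sig.getD (k+1) 0) := by
      unfold plotStep
      have e1 : ((k : Int) + 1) = ((k + 1 : Nat) : Int) := by push_cast; ring
      have e2 : (((k + 1 : Nat) : Int) - 1) = ((k : Nat) : Int) := by push_cast; ring
      rw [e1, e2, PySem.List.pyGetD_natCast, PySem.List.pyGetD_natCast]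
      have hne0 : ¬ ((k : Int) + 1 = 0) := by omega
      have hlast : ((k : Int) + 1 = (sig.length : Int) - 1) ↔ (k + 2 = sig.length) := by omega
      by_cases hp : sig[k]?.getD 0 = sig[k+1]?.getD 0 <;>
        by_cases hl : k + 2 = sig.length <;>
          simp [hne0, hlast, hp, hl, List.append_assoc]
    rw [hstep]
    have e3 : ((k : Int) + 1 + 1) = ((k + 1 : Nat) : Int) + 1 := by push_cast; ring
    rw [e3]
    by_cases hl : k + 2 = sig.length
    · rw [if_pos hl, ih (k+1) _ hk1 (by omega)]
      rw [if_pos (by omega : k + 1 + 1 = sig.length)]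
      rw [if_neg (by omega : ¬ (k + 1 = sig.length))]
      rw [pvGetD_drop hk1]
      have hdrop2 : sig.drop (k + 2) = [] := List.drop_eq_nil_of_le (by omega)
      have hlastidx : sig.length - 1 = k + 1 := by omega
      simp [pvCore, hdrop2, hlastidx]
    · rw [if_neg hl, ih (k+1) _ hk1 (by omega)]
      rw [if_neg (by omega : ¬ (k + 1 + 1 = sig.length))]
      rw [if_neg (by omega : ¬ (k + 1 = sig.length))]
      rw [pvGetD_drop hk1]
      simp [pvCore]

-- bridge: A's '[head] ++ core ++ [last]' form is the recursive step shape
theorem pvCore_step (t : List Int) : ∀ a : Int,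
    a :: (pvCore a t ++ [(a :: t).getD t.length 0]) = pvStep (a :: t) := by
  induction t with
  | nil => intro a; simp [pvCore, pvStep]
  | cons c t ih =>
    intro a
    have hlen : (a :: c :: t).getD (c :: t).length 0 = (c :: t).getD t.length 0 := by
      simp
      rfl
    rw [pvStep, ← ih c, pvCore, hlen]
    by_cases h : a = c <;> simp [h]

theorem pvMain (sig : List Int) (hne : sig ≠ []) : plotSignal sig = plotSignal_alt sig := by
  match sig with
  | [] => exact absurd rfl hne
  | [a] =>
    show plotSignal [a] = plotSignal_alt [a]
    rw [pvAltEq]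
    simp only [plotSignal]
    simp [plotStep, pvStep, PySem.List.pyRange, PySem.List.pyGetD, PySem.List.pyGet?,
      PySem.List.pyIdx?]
  | a :: b :: ts =>
    show plotSignal (a :: b :: ts) = plotSignal_alt (a :: b :: ts)
    rw [pvAltEq]
    simp only [plotSignal]
    have hn : (0 : Int) < ((a :: b :: ts).length : Int) := by simp; omega
    rw [PySem.List.pyRange_one_cons hn, List.foldl_cons]
    have hfirst : plotStep (a :: b :: ts) ([], a) 0 = ([a], a) := by
      have hx : ¬ ((0 : Int) = ((ts.length : Int)) + 1) := by omega
      have hy : (0 : Int) ≤ ((ts.length : Int)) + 1 := by omega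
      unfold plotStep
      simp [PySem.List.pyGetD, PySem.List.pyGet?, PySem.List.pyIdx?, hx, hy]
    rw [hfirst]
    have hA := pvAFold (a :: b :: ts) (ts.length + 1) 0 [a] (by simp) (by simp; omega)
    have e0 : ((0 : Nat) : Int) + 1 = (0 : Int) + 1 := by norm_num
    rw [e0] at hA
    have hget0 : (a :: b :: ts).getD 0 0 = a := rfl
    rw [hget0] at hA
    rw [hA, if_neg (by simp : ¬ (0 + 1 = (a :: b :: ts).length))]
    rw [← pvCore_step]
    simp

-- ===== VERDICT (by name: the statement is the Claim_ definition above) =====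
theorem plotSignal_spec : Claim_equal_plotSignal := by
  intro sigVal _ hpre
  exact pvMain sigVal hpre
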